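-- pv_equiv track=rewrite | github.com/matel2394/project | Python.git/Cos Pro 2/3차시/3차 2급 7_initial_code.py | solution
-- ===== SOURCE A (Python) =====
-- def solution(num_apple, num_carrot, k): #주스 몇잔 만들 수 있는지 구하는 함수
--     answer = 0 #주스 갯수
--
--     if num_apple < num_carrot * 3: #carrot에 3곱한것이 apple보다 많다면
--         answer = num_apple // 4 #주스갯수는 apple 수를 4로 나눈것
--     else: #아니면
--         answer = num_carrot #주스 갯수는 당근갯수
--
--     num_apple -= answer * 3 #사과 갯수에서 주스 갯수를 뺌
--     num_carrot -= answer # 당근 갯수에서 주스 갯수를 뺌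
--
--     i = 0
--     while k - (num_apple + num_carrot + i) > 0:
--         if i % 4 == 0:
--             answer += 1
--         i = i + 1
--
--     return answer
-- ===== SOURCE B (Python) =====
-- def solution(num_apple, num_carrot, k):
--     # closed form: no loop; ceil of the positive shortfall over 4
--     if num_apple < num_carrot * 3:
--         base = num_apple // 4
--     else:
--         base = num_carrot
--     rem = k - (num_apple - base * 3) - (num_carrot - base)
--     return base + (max(rem, 0) + 3) // 4
-- ===== Notes on version B (the rewrite author's own statement) =====
-- stated objective: faster
-- what changed: Replaces the O(k) while-loop that bumps the count every 4th iteration with a closed-form ceil((shortfall)/4) arithmetic expression.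
import Mathlib
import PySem

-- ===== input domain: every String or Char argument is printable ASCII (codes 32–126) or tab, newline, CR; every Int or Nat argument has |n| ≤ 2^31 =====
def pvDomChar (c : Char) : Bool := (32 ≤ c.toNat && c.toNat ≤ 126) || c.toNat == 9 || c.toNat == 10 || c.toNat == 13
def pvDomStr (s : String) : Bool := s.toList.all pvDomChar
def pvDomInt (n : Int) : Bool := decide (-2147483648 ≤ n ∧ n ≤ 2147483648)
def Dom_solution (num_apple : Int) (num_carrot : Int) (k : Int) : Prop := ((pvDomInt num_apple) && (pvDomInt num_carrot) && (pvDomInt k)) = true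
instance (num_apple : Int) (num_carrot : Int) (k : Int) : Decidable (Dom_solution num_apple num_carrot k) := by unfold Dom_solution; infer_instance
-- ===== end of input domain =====

-- B replaces A's O(k) counting loop with a closed-form ceil(shortfall/4); return values proved equal.
-- ===== PORT A =====
-- the while loop: while k - (na + nc + i) > 0: if i % 4 == 0: answer += 1; i += 1
def solutionLoop (na nc k : Int) (i answer : Int) : Int :=
  if 0 < k - (na + nc + i) then
    solutionLoop na nc k (i + 1) (if i % 4 = 0 then answer + 1 else answer)
  else answer
termination_by (k - (na + nc + i)).toNat
decreasing_by omega

def solution (num_apple : Int) (num_carrot : Int) (k : Int) : Int :=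
  let answer : Int := if num_apple < num_carrot * 3 then PySem.Int.floordiv num_apple 4 else num_carrot
  let na := num_apple - answer * 3
  let nc := num_carrot - answer
  solutionLoop na nc k 0 answer

-- ===== PORT B =====
def solution_alt (num_apple : Int) (num_carrot : Int) (k : Int) : Int :=
  let base : Int := if num_apple < num_carrot * 3 then PySem.Int.floordiv num_apple 4 else num_carrot
  let rem : Int := k - (num_apple - base * 3) - (num_carrot - base)
  base + PySem.Int.floordiv (max rem 0 + 3) 4

-- ===== PRECONDITION & SPEC =====
def Spec_solution (num_apple : Int) (num_carrot : Int) (k : Int) (out : Int) : Prop := out = solution_alt num_apple num_carrot k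
instance (num_apple : Int) (num_carrot : Int) (k : Int) (out : Int) : Decidable (Spec_solution num_apple num_carrot k out) := by unfold Spec_solution; infer_instance

-- ===== CLAIM (what is proved, stated in full; the proofs are below) =====
def Claim_equal_solution : Prop := ∀ (num_apple : Int) (num_carrot : Int) (k : Int), Dom_solution num_apple num_carrot k → Spec_solution num_apple num_carrot k (solution num_apple num_carrot k)

-- ===== LEMMAS AND PROOFS =====
-- the loop adds the number of multiples of 4 in [i, k-na-nc)
theorem solutionLoop_eq (na nc k : Int) (i answer : Int) (hi : 0 ≤ i) :
    solutionLoop na nc k i answer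
      = answer + (if k - na - nc ≤ i then 0 else (k - na - nc - 1) / 4 - (i - 1) / 4) := by
  rw [solutionLoop]
  by_cases h : 0 < k - (na + nc + i)
  · rw [if_pos h, solutionLoop_eq na nc k (i + 1) _ (by omega)]
    split_ifs <;> omega
  · rw [if_neg h]
    split_ifs <;> omega
termination_by (k - (na + nc + i)).toNat
decreasing_by omega

theorem floordiv_eq_ediv (a : Int) : PySem.Int.floordiv a 4 = a / 4 := by
  simp only [PySem.Int.floordiv]
  exact Int.fdiv_eq_ediv_of_nonneg a (by norm_num)

-- ===== VERDICT (by name: the statement is the Claim_ definition above) =====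
theorem solution_spec : Claim_equal_solution := by
  intro num_apple num_carrot k _
  unfold Spec_solution solution solution_alt
  simp only []
  set base : Int := if num_apple < num_carrot * 3 then PySem.Int.floordiv num_apple 4 else num_carrot with hb
  rw [solutionLoop_eq _ _ _ 0 base (le_refl 0),
      floordiv_eq_ediv]
  omega
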